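/- GENERATED by mk_final_copies.py from the proof of the farm's unit `vorbis_decode_packet_rest.5b` (farm:vorbis_decode_packet_rest.5b.1: Proof.lean) as the
   re-elaboration sweep compiled it — do not edit. -/
import Asan.CheckWalk
import Vorbis.Spec.PacketRestFrame
import Vorbis.Spec.PacketRestTest
import Vorbis.Spec.Units.vorbis_decode_packet_rest_5b
import Vorbis.Spec.Worked.vorbis_decode_packet_rest_5b_Lemmas

/-!
  THE PROOF of the unit `vorbis_decode_packet_rest.5b` (0x11109c – 0x1111a1 and the return of `predict_point` into 0x1111a6; lines
  3266 – 3271 of stb_vorbis_fixed.c). The segment is walked in THREE stages, one lemma each (the heartbeat budget is per declaration):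

      seg5b_to_ret44        (Lemmas.lean)  0x11109c … ret44 = 0x111128: the check of `g->values`, the exit `At6`, the checks of
                                           `neighbors[j][0/1]`, `finalY[high]`, `finalY[low]`
      seg5b_ret44_to_ret46  (below)        0x111128 … ret46 = 0x111168: the checks of `Xlist[high]`, `Xlist[low]`
      seg5b_ret46_to_pred   (below)        0x111168 … the call of predict_point and its return: the check of `Xlist[j]`,
                                           predict_point's precondition (FL10), the exit `AtNbPred` (`nb5b_pred_exit`)

  Each stage hands the walker's state at its last check return to the next one as a hypothesis `hrest`.
-/

namespace Vorbis.Spec.vorbis_decode_packet_rest_5b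
open X86 X86.User Asan Vorbis Vorbis.Spec Vorbis.Spec.vorbis_decode_packet_rest

variable {others : List Obj} {frames : List (Nat × FrameLayout)} {len : Nat} {Ar : Arena} {stored room : Int}
  {ysz : Nat → Nat} {mem : Mem} {f : Nat}

set_option maxRecDepth 40000

/-- `movzx r32, word [slot]` of a stored zero-extended `uint16` `x` (the walker's form of esi at 0x111190): the number `x`. -/
theorem nb5b_zx16_slot (x : Nat) (h : x < 65536) :
    (Word.ofBV (BitVec.zeroExtend 32 (BitVec.ofNat 16
      ((BitVec.setWidth 16 (BitVec.zeroExtend 32 (BitVec.ofNat 16 x))).toNat % 65536)))).toNat = x := by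
  rw [Vorbis.toNat_ofBV32]
  simp only [BitVec.truncate_eq_setWidth, BitVec.toNat_setWidth, BitVec.toNat_ofNat]
  omega

/-- `movzx r32, r16` of a zero-extended `uint16` `x` (the walker's form of edx at 0x11118c): the number `x`. -/
theorem nb5b_zx16_reg (x : Nat) (h : x < 65536) :
    (Word.ofBV (BitVec.zeroExtend 32 (BitVec.setWidth 16 (BitVec.zeroExtend 32 (BitVec.ofNat 16 x))))).toNat = x := by
  rw [Vorbis.toNat_ofBV32]
  simp only [BitVec.truncate_eq_setWidth, BitVec.toNat_setWidth, BitVec.toNat_ofNat]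
  omega

/-- `r14 = j + j` (0x1110d4 `lea r14, [rbx + rbx]`) is the word `2·j`. -/
theorem nb5b_double (j : Nat) (h : j ≤ 250) : UInt64.ofNat j + UInt64.ofNat j = UInt64.ofNat (2 * j) := by
  apply UInt64.toNat_inj.mp
  rw [UInt64.toNat_add, UInt64.toNat_ofNat_of_lt' (by unfold UInt64.size; omega),
    UInt64.toNat_ofNat_of_lt' (by unfold UInt64.size; omega)]
  omega

/-- **The load of `g->Xlist[k]`** at the walker's address `r15 + (w + 168)·2 + 2` (`lea rbp, [idx + 0xa8]`, `[r15 + rbp*2 + 2]`), `w` the word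
of the index `k < 250`: the accessor `Floor1.Xlist mem g k`. -/
theorem nb5b_xlist (mem : Mem) (r w : Word) (g k : Nat) (hr : r.toNat = g) (hw : w.toNat = k) (hk : k < 250)
    (hg : g + 1596 ≤ 0xC00000) : mem.readLE (r + (w + 168) * 2 + 2) 2 = Floor1.Xlist mem g k := by
  simp only [vacc, voff]
  show _ = mem.readLE (addr _) 2
  congr 1
  apply UInt64.toNat_inj.mp
  rw [toNat_addr _ (by omega)]
  u_omega

/-- **The exit of .5b at the return of `predict_point`** (0x1111a6): a state `r` whose memory differs from the one at the loop head
(`v`) only below the spill slot `[0x20]` (the callee's frame, the return addresses, the scratch slots `[0x0] … [0x18]`) and in the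
dword `[0x2c]`, with r13, r15 unchanged, `r14 = j + j`, `j < values` and the two dwords `[rsp]`, `[rsp + 8]` below 256, satisfies
`AtNbPred … i j` (`Stable.nb_carry` of the tree + the three spill slots `[0x20] [0x30] [0x38]`, which no window meets). -/
theorem nb5b_pred_exit {u₀ : State} {others : List Obj} {frames : List (Nat × FrameLayout)} {len : Nat} {Ar : Arena}
    {stored room : Int} {mode : Nat} {ysz : Nat → Nat} {e : State} {ret : Word} {i j : Nat} {v r : State}
    (hat : AtNbLoop u₀ others frames len Ar stored room mode ysz e ret i j v)
    (hrip : r.rip = Vorbis.L.vorbis_decode_packet_rest.cut11)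
    (hrsp : r.reg .rsp = e.reg .rsp - 3000) (hcode : Vorbis.CodeOK u₀ r.mem) (habi : abiInv r)
    (hs : Mem.SameExcept [⟨(e.reg .rsp).toNat - 3856, (e.reg .rsp).toNat - 2968⟩,
        ⟨(e.reg .rsp).toNat - 2956, (e.reg .rsp).toNat - 2952⟩] v.mem r.mem)
    (hun : ShadowUntouched v.mem r.mem)
    (h13 : r.reg .r13 = v.reg .r13) (h14 : r.reg .r14 = UInt64.ofNat j + UInt64.ofNat j) (h15 : r.reg .r15 = v.reg .r15)
    (hjlt : (j : Int) < Floor1.values v.mem (v.reg .r15).toNat)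
    (hlow : r.mem.readLE (e.reg .rsp - 3000) 4 < 256) (hhigh : r.mem.readLE (e.reg .rsp - 2992) 4 < 256) :
    AtNbPred u₀ others frames len Ar stored room mode ysz e ret i j r := by
  have hR1 : 0x700000 + 3856 ≤ (e.reg .rsp).toNat := hat.entry.room
  have hR2 : (e.reg .rsp).toNat + 8 ≤ 0x800000 := hat.entry.top
  -- the two windows lie inside the first of `nbWins`
  have hs' : Mem.SameExcept (nbWins ysz e v.mem i) v.mem r.mem := by
    apply hs.mono
    intro w hw a h1 h2
    simp only [List.mem_cons, List.mem_nil_iff, or_false] at hw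
    unfold nbWins
    rcases hw with rfl | rfl
    · exact ⟨_, List.mem_cons_self, by simp only [] at h1 h2 ⊢; omega⟩
    · exact ⟨_, List.mem_cons_self, by simp only [] at h1 h2 ⊢; omega⟩
  obtain ⟨hst, hi', hg', hval, efy, emap⟩ := Stable.nb_carry hat.toStable hat.i_lt hat.g hrsp hcode habi hs' hun
  -- the three spill slots are off the two windows
  have rd : ∀ (k n : Nat), 0x20 ≤ k → k + n ≤ 0x3c → (k + n ≤ 0x2c ∨ 0x30 ≤ k) →
      r.mem.readLE (e.reg .rsp - 3000 + UInt64.ofNat k) n = v.mem.readLE (e.reg .rsp - 3000 + UInt64.ofNat k) n := by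
    intro k n h1 h2 h3
    have ea := toNat_slot (e.reg .rsp) k (by omega) hR1 hR2
    apply hs.readLE _ n (by omega)
    intro w hw
    simp only [List.mem_cons, List.mem_nil_iff, or_false] at hw
    rcases hw with rfl | rfl <;> simp only [] <;> omega
  have hfl := (hat.inv.config.floor.floor hat.g).values_bounds
  have a0 : e.reg .rsp - 3000 + 0x0 = e.reg .rsp - 3000 := by
    u_omega
  have a8 : e.reg .rsp - 3000 + 0x8 = e.reg .rsp - 2992 := by
    u_omega
  refine { toStable := hst, rip := hrip, g := ?_, r13 := ?_, r14 := ?_, j_ge := hat.j_ge, j_lt := ?_, slot_low := ?_,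
           slot_high := ?_, slot_i := ?_, i_lt := hi', slot_finalY := ?_, slot_map := ?_ }
  · rw [h15]
    exact hg'
  · rw [h13]
    exact hat.r13
  · rw [h14]
    exact nb5b_double j (by omega)
  · rw [h15, hval]
    exact hjlt
  · show r.mem.readLE (e.reg .rsp - 3000 + 0x0) 4 < 256
    rw [a0]
    exact hlow
  · show r.mem.readLE (e.reg .rsp - 3000 + 0x8) 4 < 256
    rw [a8]
    exact hhigh
  · show r.mem.readLE (e.reg .rsp - 3000 + 0x38) 4 = i
    rw [← hat.slot_i]
    exact rd 0x38 4 (by omega) (by omega) (by omega)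
  · show r.mem.readLE (e.reg .rsp - 3000 + 0x20) 8 = _
    rw [efy, ← hat.slot_finalY]
    exact rd 0x20 8 (by omega) (by omega) (by omega)
  · show r.mem.readLE (e.reg .rsp - 3000 + 0x30) 8 = _
    rw [emap, ← hat.slot_map]
    exact rd 0x30 8 (by omega) (by omega) (by omega)

set_option maxHeartbeats 4000000 in
/-- **Segment .5b from the return of the fourth check call to the return of the sixth** (0x111128 = `ret44` … 0x111163, returning into
0x111168 = `ret46`): the load of `finalY[low]` and its spill `[0x18]`, the reload of `high` (`movsxd rax, [rsp + 8]`: fact `sxhi`), the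
load2 check of `g->Xlist[high]` (0x111145) and its load into r12, the reload of `low` (fact `sxlo`), the load2 check of `g->Xlist[low]`
(0x111163); both checks by `FloorShape.site_Xlist` (`low, high < j < 250`, FL10). The state at `ret44` is given AS THE WALKER HAD IT
at the end of `seg5b_to_ret44` (Lemmas.lean); the rest of the segment is the hypothesis `hrest` about the walker's state at `ret46`
(proved by `seg5b_ret46_to_pred`). The loads are NAMED before the walk (`xhi = g->Xlist[high]`, `ylo`, `yhi`). 45 s. -/
theorem seg5b_ret44_to_ret46 {Lay : Layout} (hLay : Lay.hi = 0x1000000) {μ : Microarch} (hμ : UserX.MicroOK μ) {u₀ : State}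
    (hcode : HasCodeNat Lay u₀ Vorbis.L.vorbis_decode_packet_rest.entry Vorbis.Code.code_vorbis_decode_packet_rest.nat
      Vorbis.L.vorbis_decode_packet_rest.size)
    (hload2 : Asan.SmallCheck Lay μ Vorbis.WayInv (Vorbis.CodeOK u₀) [.rax, .rcx, .rdx] 2 Vorbis.L.__asan_load2_noabort.entry)
    {mode : Nat} {e v : State} {ret : Word} {i j : Nat}
    (hat : AtNbLoop u₀ others frames len Ar stored room mode ysz e ret i j v)
    (Post : State → Prop)
    (s : State) (g V fy lo hi : Nat) (wfy wlo whi : Word)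
    (hg : (v.reg .r15).toNat = g) (hVal : Floor1.values v.mem g = (V : Int)) (hjV : j < V) (_hV250 : V ≤ 250)
    (hfy : stb_vorbis.finalY v.mem (fOf e) i = fy)
    (_hlo : Floor1.neighbors v.mem g j 0 = lo) (_hhi : Floor1.neighbors v.mem g j 1 = hi) (hloj : lo < j) (hhij : hi < j)
    (hwfy : UInt64.ofNat fy = wfy) (hwlo : UInt64.ofNat lo = wlo) (hwhi : UInt64.ofNat hi = whi)
    (w_rip : s.rip = 0x111128) (w_rsp : s.reg .rsp = e.reg .rsp - 3000)
    (w_kept : RegsKept [.r12, .rsi, .r14, .rbp, .rbx, .rsp, .rdi, .rax, .rcx, .rdx] v s)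
    (w_r12 : s.reg .r12 = wfy + whi * 2)
    (w_r14 : s.reg .r14 = UInt64.ofNat j + UInt64.ofNat j)
    (w_rbp : s.reg .rbp = wfy + wlo * 2)
    (w_rbx : s.reg .rbx = UInt64.ofNat j)
    (w_mem : s.mem = ((((((v.mem.writeLE (e.reg .rsp - 3008) 8 1118408).writeLE (e.reg .rsp - 3000) 4
                  (Word.part Width.w32 wlo).toNat).writeLE
                (e.reg .rsp - 3008) 8 1118437).writeLE
              (e.reg .rsp - 2992) 4 (Word.part Width.w32 whi).toNat).writeLE
            (e.reg .rsp - 3008) 8 1118473).writeLE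
          (e.reg .rsp - 2984) 2
          (BitVec.setWidth 16 (BitVec.zeroExtend 32
            (BitVec.ofNat 16 (v.mem.readLE (wfy + whi * 2) 2)))).toNat).writeLE
        (e.reg .rsp - 3008) 8 1118504)
    (w_eq : Mem.EqOn 1048576 1154368 u₀.mem s.mem) (w_df_111123 : s.flags .df = false) (w_mxcsr : s.mxcsr = v.mxcsr)
    (hrest : ∀ (t : State) (xhi ylo yhi : Nat),
      Floor1.Xlist v.mem g hi = xhi →
      t.rip = 0x111168 → t.reg .rsp = e.reg .rsp - 3000 →
      RegsKept [.r12, .rsi, .r14, .rbp, .rbx, .rsp, .rdi, .rax, .rcx, .rdx] v t →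
      t.reg .r12 = Word.ofBV (BitVec.zeroExtend 32 (BitVec.ofNat 16 xhi)) →
      t.reg .r14 = UInt64.ofNat j + UInt64.ofNat j →
      t.reg .rbp = wlo + 168 →
      t.reg .rbx = UInt64.ofNat j →
      t.mem = ((((((((v.mem.writeLE (e.reg Reg.rsp - 3008) 8 1118408).writeLE (e.reg Reg.rsp - 3000) 4
                                  (Word.part Width.w32 wlo).toNat).writeLE
                              (e.reg Reg.rsp - 3008) 8 1118437).writeLE
                          (e.reg Reg.rsp - 2992) 4 (Word.part Width.w32 whi).toNat).writeLE
                      (e.reg Reg.rsp - 3008) 8 1118473).writeLE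
                  (e.reg Reg.rsp - 2984) 2
                  (BitVec.setWidth 16 (BitVec.zeroExtend 32 (BitVec.ofNat 16 yhi))).toNat).writeLE
              (e.reg Reg.rsp - 3008) 8 1118504).writeLE
          (e.reg Reg.rsp - 2976) 2 (BitVec.setWidth 16 (BitVec.zeroExtend 32 (BitVec.ofNat 16 ylo))).toNat).writeLE
      (e.reg Reg.rsp - 3008) 8 1118568 →
      Mem.EqOn 1048576 1154368 u₀.mem t.mem → t.flags .df = false → t.mxcsr = v.mxcsr →
      Lay.Has (v.reg Reg.r15 + wlo * 2 + 338) 2 →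
      ReachVia Lay μ Vorbis.WayInv t Post) :
    ReachVia Lay μ Vorbis.WayInv s Post := by
  have he := hat.entry
  v_entry he
  have c_rsp : v.reg .rsp = e.reg .rsp - 3000 := hat.rsp
  have c_r13 : v.reg .r13 = UInt64.ofNat j := hat.r13
  have hdf : v.flags .df = false := (show abiInv _ from hat.abi).1
  have hmx : v.mxcsr &&& 0x1F80 = 0x1F80 := (show abiInv _ from hat.abi).2
  have hsse := Vorbis.sseOK_of_abiInv hat.abi
  have hgfl : IsFloor v.mem (fOf e) g := by
    rw [← hg]
    exact hat.g
  obtain ⟨V', hV2, hV250', hVy, hg1, hg2, hgoff, hVal', hvalm⟩ := nb5b_values hat.inv hat.i_lt hgfl hg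
  obtain ⟨hy4, hyt, hyc, hyoff, hyf⟩ := nb5b_finalY_geom hat.inv hat.i_lt
  rw [hfy] at hyt hyc hyoff hyf
  have hyt' : 0x119d40 ≤ fy := hyt
  have sfy : v.mem.readLE (e.reg .rsp - 2968) 8 = fy := by
    rw [← hfy, ← hat.slot_finalY]
    show _ = v.mem.readLE _ 8
    congr 1
    u_omega
  have twlo : wlo.toNat = lo := by
    rw [← hwlo]
    exact UInt64.toNat_ofNat_of_lt' (by unfold UInt64.size; omega)
  have twhi : whi.toNat = hi := by
    rw [← hwhi]
    exact UInt64.toNat_ofNat_of_lt' (by unfold UInt64.size; omega)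
  have twfy : wfy.toNat = fy := by
    rw [← hwfy]
    exact UInt64.toNat_ofNat_of_lt' (by unfold UInt64.size; omega)
  have sxhi : Word.ofBV (BitVec.signExtend 64 (BitVec.ofNat 32 ((Word.part .w32 whi).toNat % 4294967296))) = whi := by
    rw [← hwhi, nb5b_part32 hi (by omega)]
    exact nb5b_sx32 hi (by omega)
  have sxlo : Word.ofBV (BitVec.signExtend 64 (BitVec.ofNat 32 ((Word.part .w32 wlo).toNat % 4294967296))) = wlo := by
    rw [← hwlo, nb5b_part32 lo (by omega)]
    exact nb5b_sx32 lo (by omega)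
  have hfsh := hat.inv.fb.vorbis.floor.toFloorShape
  -- the loads of the stage, named
  have rxhi := nb5b_xlist v.mem (v.reg .r15) whi g hi hg twhi (by omega) hg2
  obtain ⟨xhi, exhi⟩ : ∃ x : Nat, Floor1.Xlist v.mem g hi = x := ⟨_, rfl⟩
  rw [exhi] at rxhi
  obtain ⟨ylo, rylo⟩ : ∃ x : Nat, v.mem.readLE (wfy + wlo * 2) 2 = x := ⟨_, rfl⟩
  obtain ⟨yhi, ryhi⟩ : ∃ x : Nat, v.mem.readLE (wfy + whi * 2) 2 = x := ⟨_, rfl⟩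
  rw [ryhi] at w_mem
  u_walk hcode [hμ.vendor, sxhi, sxlo] until [Vorbis.L.vorbis_decode_packet_rest.ret45] span [Vorbis.L.textLo, Vorbis.L.textHi] side (v_side)
  · -- 0x111145: load2 `g->Xlist[high]`
    have hun : ShadowUntouched v.mem s_111145.mem := by v_untouched
    have hs := hfsh.site_Xlist hat.inv.live hgfl (j := hi) (by simp only [voff]; omega) rfl
    simp only [voff] at hs
    exact Vorbis.Spec.check_site hat.shadow hun hs (by u_omega)
  u_walk hcode [hμ.vendor, sxhi, sxlo] until [Vorbis.L.vorbis_decode_packet_rest.ret46] span [Vorbis.L.textLo, Vorbis.L.textHi] side (v_side)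
  · -- 0x111163: load2 `g->Xlist[low]`
    have hun : ShadowUntouched v.mem s_111163.mem := by v_untouched
    have hs := hfsh.site_Xlist hat.inv.live hgfl (j := lo) (by simp only [voff]; omega) rfl
    simp only [voff] at hs
    exact Vorbis.Spec.check_site hat.shadow hun hs (by u_omega)
  clear w_acc_111145
  exact hrest s_111163r xhi ylo yhi exhi w_rip w_rsp w_kept w_r12 w_r14 w_rbp w_rbx w_mem w_eq w_df_111163 w_mxcsr w_acc_111163

set_option maxHeartbeats 4000000 in
/-- **Segment .5b from the return of the sixth check call to its exit** (0x111168 = `ret46` … the call of `predict_point` at 0x1111a1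
and its return into 0x1111a6 = `cut11`): the load of `g->Xlist[low]` and its spill `[0x2c]`, the load2 check of `g->Xlist[j]` (0x111182:
`FloorShape.site_Xlist`), the five argument loads, `predict_point`'s precondition (`PacketRestTest.predict_point_pre`: FL10 gives
`Xlist[low] ≤ Xlist[j] < Xlist[high]`, the registers are zero-extended `uint16`s) and, at the return, the exit assertion `AtNbPred`
(`nb5b_pred_exit`). The state at `ret46` is given AS THE WALKER HAD IT there (the hypotheses `w_…`; `xhi = g->Xlist[high]`, `ylo`,
`yhi` = the two `finalY` words, all named). `j` enters the walk as the opaque word `wj` (with `UInt64.ofNat j` in the address of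
`Xlist[j]` the walk dies at `whnf`). 70 s. -/
theorem seg5b_ret46_to_pred {Lay : Layout} (hLay : Lay.hi = 0x1000000) {μ : Microarch} (hμ : UserX.MicroOK μ) {u₀ : State}
    (hcode : HasCodeNat Lay u₀ Vorbis.L.vorbis_decode_packet_rest.entry Vorbis.Code.code_vorbis_decode_packet_rest.nat
      Vorbis.L.vorbis_decode_packet_rest.size)
    (hload2 : Asan.SmallCheck Lay μ Vorbis.WayInv (Vorbis.CodeOK u₀) [.rax, .rcx, .rdx] 2 Vorbis.L.__asan_load2_noabort.entry)
    {mode : Nat} {e v : State} {ret : Word} {i j : Nat}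
    (hpp : Calls Lay μ Vorbis.WayInv (Vorbis.conv u₀) Vorbis.L.predict_point.entry
      (Vorbis.Spec.predict_point.spec others (framesIn frames e)))
    (hat : AtNbLoop u₀ others frames len Ar stored room mode ysz e ret i j v)
    (Post : State → Prop)
    (hpost : ∀ w, AtNbPred u₀ others frames len Ar stored room mode ysz e ret i j w → Post w)
    (s : State) (g V fy lo hi xhi ylo yhi : Nat) (wfy wlo whi : Word)
    (hg : (v.reg .r15).toNat = g) (hVal : Floor1.values v.mem g = (V : Int)) (hjV : j < V) (_hV250 : V ≤ 250)
    (hfy : stb_vorbis.finalY v.mem (fOf e) i = fy)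
    (hlo : Floor1.neighbors v.mem g j 0 = lo) (hhi : Floor1.neighbors v.mem g j 1 = hi) (hloj : lo < j) (hhij : hi < j)
    (_hwfy : UInt64.ofNat fy = wfy) (hwlo : UInt64.ofNat lo = wlo) (hwhi : UInt64.ofNat hi = whi)
    (exhi : Floor1.Xlist v.mem g hi = xhi)
    (w_rip : s.rip = 0x111168) (w_rsp : s.reg .rsp = e.reg .rsp - 3000)
    (w_kept : RegsKept [.r12, .rsi, .r14, .rbp, .rbx, .rsp, .rdi, .rax, .rcx, .rdx] v s)
    (w_r12 : s.reg .r12 = Word.ofBV (BitVec.zeroExtend 32 (BitVec.ofNat 16 xhi)))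
    (w_r14 : s.reg .r14 = UInt64.ofNat j + UInt64.ofNat j)
    (w_rbp : s.reg .rbp = wlo + 168)
    (w_rbx : s.reg .rbx = UInt64.ofNat j)
    (w_mem : s.mem = ((((((((v.mem.writeLE (e.reg Reg.rsp - 3008) 8 1118408).writeLE (e.reg Reg.rsp - 3000) 4
                                  (Word.part Width.w32 wlo).toNat).writeLE
                              (e.reg Reg.rsp - 3008) 8 1118437).writeLE
                          (e.reg Reg.rsp - 2992) 4 (Word.part Width.w32 whi).toNat).writeLE
                      (e.reg Reg.rsp - 3008) 8 1118473).writeLE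
                  (e.reg Reg.rsp - 2984) 2
                  (BitVec.setWidth 16 (BitVec.zeroExtend 32 (BitVec.ofNat 16 yhi))).toNat).writeLE
              (e.reg Reg.rsp - 3008) 8 1118504).writeLE
          (e.reg Reg.rsp - 2976) 2 (BitVec.setWidth 16 (BitVec.zeroExtend 32 (BitVec.ofNat 16 ylo))).toNat).writeLE
      (e.reg Reg.rsp - 3008) 8 1118568)
    (w_eq : Mem.EqOn 1048576 1154368 u₀.mem s.mem) (w_df_111163 : s.flags .df = false) (w_mxcsr : s.mxcsr = v.mxcsr)
    (w_acc_111163 : Lay.Has (v.reg Reg.r15 + wlo * 2 + 338) 2) :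
    ReachVia Lay μ Vorbis.WayInv s Post := by
  have he := hat.entry
  v_entry he
  have c_rsp : v.reg .rsp = e.reg .rsp - 3000 := hat.rsp
  have c_r13 : v.reg .r13 = UInt64.ofNat j := hat.r13
  have hdf : v.flags .df = false := (show abiInv _ from hat.abi).1
  have hmx : v.mxcsr &&& 0x1F80 = 0x1F80 := (show abiInv _ from hat.abi).2
  have hsse := Vorbis.sseOK_of_abiInv hat.abi
  have hgfl : IsFloor v.mem (fOf e) g := by
    rw [← hg]
    exact hat.g
  obtain ⟨V', hV2, hV250', hVy, hg1, hg2, hgoff, hVal', hvalm⟩ := nb5b_values hat.inv hat.i_lt hgfl hg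
  have twlo : wlo.toNat = lo := by
    rw [← hwlo]
    exact UInt64.toNat_ofNat_of_lt' (by unfold UInt64.size; omega)
  have twhi : whi.toNat = hi := by
    rw [← hwhi]
    exact UInt64.toNat_ofNat_of_lt' (by unfold UInt64.size; omega)
  obtain ⟨wj, hwj⟩ : ∃ w : Word, UInt64.ofNat j = w := ⟨_, rfl⟩
  have twj : wj.toNat = j := by
    rw [← hwj]
    exact UInt64.toNat_ofNat_of_lt' (by unfold UInt64.size; omega)
  rw [hwj] at w_rbx w_r14 c_r13
  have hfsh := hat.inv.fb.vorbis.floor.toFloorShape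
  -- the three loads of `g->Xlist`, named
  have rxhi := nb5b_xlist v.mem (v.reg .r15) whi g hi hg twhi (by omega) hg2
  have rxlo := nb5b_xlist v.mem (v.reg .r15) wlo g lo hg twlo (by omega) hg2
  have rxj := nb5b_xlist v.mem (v.reg .r15) wj g j hg twj (by omega) hg2
  obtain ⟨xlo, exlo⟩ : ∃ x : Nat, Floor1.Xlist v.mem g lo = x := ⟨_, rfl⟩
  obtain ⟨xj, exj⟩ : ∃ x : Nat, Floor1.Xlist v.mem g j = x := ⟨_, rfl⟩
  rw [exhi] at rxhi
  rw [exlo] at rxlo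
  rw [exj] at rxj
  have hxlo : xlo < 65536 := by
    rw [← exlo]
    exact Floor1.Xlist_lt _ _ _
  have hxhi : xhi < 65536 := by
    rw [← exhi]
    exact Floor1.Xlist_lt _ _ _
  u_walk hcode [hμ.vendor] until [Vorbis.L.vorbis_decode_packet_rest.ret47] span [Vorbis.L.textLo, Vorbis.L.textHi] side (v_side)
  · -- 0x111182: load2 `g->Xlist[j]`
    have hun : ShadowUntouched v.mem s_111182.mem := by v_untouched
    have hs := hfsh.site_Xlist hat.inv.live hgfl (j := j) (by simp only [voff]; omega) rfl
    simp only [voff] at hs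
    exact Vorbis.Spec.check_site hat.shadow hun hs (by u_omega)
  clear w_acc_111163
  -- 0x111187 … 0x1111a1: the five argument loads and the call of predict_point
  u_walk hcode [hμ.vendor] span [Vorbis.L.textLo, Vorbis.L.textHi] side (v_side)
  · -- call_inv
    v_inv
  · -- predict_point's precondition: the shadow clause, and `Xlist[low] < Xlist[high] < 2^31` (FL10)
    have hun : ShadowUntouched v.mem s_1111a1.mem := by v_untouched
    have hsh : ShadowPre others (framesIn frames e) s_1111a1 := by
      have hsp : (s_1111a1.reg .rsp).toNat = (e.reg .rsp).toNat - 3008 := by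
        rw [w_rsp]
        clear w_mem
        u_omega
      have hsp0 : (spOf e).toNat = (e.reg .rsp).toNat - 3000 := by
        simp only [spOf]
        clear w_mem
        u_omega
      refine ⟨(hat.shadow.untouched hun).lower ?_ ?_ ?_, hat.pre.1.offText⟩
      · rw [hsp, hsp0]
        omega
      · rw [hsp]
        omega
      · rw [hsp]
        omega
    have hfl1 := hat.inv.config.floor.floor hgfl
    have hnb : NbOK v.mem g j := hfl1.FL10 j hat.j_ge (by rw [hVal]; omega)
    refine Vorbis.Spec.PacketRestTest.predict_point_pre s_1111a1 g j hsh hnb ?_ ?_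
    · rw [w_rsi, nb5b_zx16_slot xlo hxlo, hlo, exlo]
    · rw [w_rdx, nb5b_zx16_reg xhi hxhi, hhi, exhi]
  · -- the return of predict_point, 0x1111a6: `AtNbPred`
    v_after_call w_rsp_1111a1 w_mem_1111a1
    -- the dwords `[rsp] = low`, `[rsp + 8] = high` over the callee's footprint
    have hp1 : s_1111a1.mem.readLE (e.reg .rsp - 3000) 4 = (Word.part .w32 wlo).toNat := by
      u_resolve
      rw [← hwlo, nb5b_part32 lo (by omega)]
      omega
    rw [w_mem_1111a1] at hp1
    have hs1 : s_1111a1r.mem.readLE (e.reg .rsp - 3000) 4 = (Word.part .w32 wlo).toNat := by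
      u_frame hp1
    have hp2 : s_1111a1.mem.readLE (e.reg .rsp - 2992) 4 = (Word.part .w32 whi).toNat := by
      u_resolve
      rw [← hwhi, nb5b_part32 hi (by omega)]
      omega
    rw [w_mem_1111a1] at hp2
    have hs2 : s_1111a1r.mem.readLE (e.reg .rsp - 2992) 4 = (Word.part .w32 whi).toNat := by
      u_frame hp2
    have hsame : Mem.SameExcept [⟨(e.reg .rsp).toNat - 3856, (e.reg .rsp).toNat - 2968⟩,
        ⟨(e.reg .rsp).toNat - 2956, (e.reg .rsp).toNat - 2952⟩] v.mem s_1111a1r.mem := by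
      u_same
    have hun : ShadowUntouched v.mem s_1111a1r.mem := by v_untouched
    have habi : abiInv s_1111a1r := by v_inv
    have h13 : s_1111a1r.reg .r13 = v.reg .r13 := w_kept .r13 rfl
    have h15 : s_1111a1r.reg .r15 = v.reg .r15 := w_kept .r15 rfl
    refine ReachVia.done (hpost _ (nb5b_pred_exit hat w_rip w_rsp w_eq habi hsame hun h13 ?_ h15 ?_ ?_ ?_))
    · rw [w_r14, ← hwj]
    · rw [hg, hVal]
      omega
    · rw [hs1, ← hwlo, nb5b_part32 lo (by omega)]
      omega
    · rw [hs2, ← hwhi, nb5b_part32 hi (by omega)]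
      omega

end Vorbis.Spec.vorbis_decode_packet_rest_5b

/-- **Segment .5b of `vorbis_decode_packet_rest`** (0x11109c – 0x1111a1, lines 3266 – 3271): from the head of the neighbors /
predict_point loop (`AtNbLoop … i j`) either to the entry of segment .6 (`values ≤ j`: `At6`) or through the eight check sites and the
call of `predict_point` to its return (`AtNbPred … i j`). The three stages chained. -/
theorem Vorbis.Spec.Worked.vorbis_decode_packet_rest_5b_ok : Vorbis.Spec.vorbis_decode_packet_rest_5b.Statement := by
  intro Lay hLay μ hμ u₀ hcode hload4 hload1 hload2 hpp
  intro others frames len Ar stored room mode ysz e ret i j v hat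
  -- stage 1: 0x11109c … ret44 (the exit `At6` is closed inside)
  refine Vorbis.Spec.vorbis_decode_packet_rest_5b.seg5b_to_ret44 hLay hμ hcode hload4 hload1 hload2 hat _
    (fun w h => Or.inl h) ?_
  intro s g V fy lo hi wfy wlo whi hg hVal hjV hV250 hfy hlo hhi hloj hhij hwfy hwlo hwhi
  intro a_rip a_rsp a_kept a_r12 a_r14 a_rbp a_rbx a_mem a_eq a_df a_mxcsr
  -- stage 2: ret44 … ret46
  refine Vorbis.Spec.vorbis_decode_packet_rest_5b.seg5b_ret44_to_ret46 hLay hμ hcode hload2 hat _ s g V fy lo hi wfy wlo whi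
    hg hVal hjV hV250 hfy hlo hhi hloj hhij hwfy hwlo hwhi a_rip a_rsp a_kept a_r12 a_r14 a_rbp a_rbx a_mem a_eq a_df a_mxcsr ?_
  intro t xhi ylo yhi exhi b_rip b_rsp b_kept b_r12 b_r14 b_rbp b_rbx b_mem b_eq b_df b_mxcsr b_acc
  -- stage 3: ret46 … the return of predict_point (`AtNbPred`)
  exact Vorbis.Spec.vorbis_decode_packet_rest_5b.seg5b_ret46_to_pred hLay hμ hcode hload2 (hpp others (Vorbis.Spec.vorbis_decode_packet_rest.framesIn frames e)) hat _
    (fun w h => Or.inr h) t g V fy lo hi xhi ylo yhi wfy wlo whi hg hVal hjV hV250 hfy hlo hhi hloj hhij hwfy hwlo hwhi exhi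
    b_rip b_rsp b_kept b_r12 b_r14 b_rbp b_rbx b_mem b_eq b_df b_mxcsr b_acc
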